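-- pv_equiv track=rewrite | github.com/vivekpabani/News-Recommendation-System | source_code/rank_classifier.py | create_tf_index
-- ===== SOURCE A (Python) =====
-- from collections import Counter, defaultdict
--
-- def create_tf_index(token_l):
--     """
--     Create an index in which each postings list contains a list of [doc_id, tf weight] pairs.
--     :param token_l: list of lists, where each sublist contains the tokens for one document.
--     :return:
--     """
--
--     index = defaultdict(lambda: list())
--
--     for i in range(len(token_l)):
--         doc = token_l[i]
--         counter = Counter(doc)
--         for token in counter.keys():
--             index[token].append([i, counter[token]])
--
--     return index
-- ===== SOURCE B (Python) =====
-- from collections import defaultdict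
--
-- def create_tf_index(token_l):
--     """
--     Create an index in which each postings list contains a list of [doc_id, tf weight] pairs.
--     :param token_l: list of lists, where each sublist contains the tokens for one document.
--     :return:
--     """
--     counts = defaultdict(lambda: defaultdict(int))
--     for i, doc in enumerate(token_l):
--         for token in doc:
--             counts[token][i] += 1
--     index = defaultdict(list)
--     for token, per_doc in counts.items():
--         index[token] = [[doc_id, tf] for doc_id, tf in per_doc.items()]
--     return index
-- ===== Notes on version B (the rewrite author's own statement) =====
-- stated objective: alternative
-- what changed: A builds the postings index document-major in one phase, making a fresh Counter per document and appending [i, tf] postings as it goes; B instead accumulates one global nested counter counts[token][doc_id] in a single token-level pass and then materialises each token's whole postings list from counts[token].items() in a second phase.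
import Mathlib
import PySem

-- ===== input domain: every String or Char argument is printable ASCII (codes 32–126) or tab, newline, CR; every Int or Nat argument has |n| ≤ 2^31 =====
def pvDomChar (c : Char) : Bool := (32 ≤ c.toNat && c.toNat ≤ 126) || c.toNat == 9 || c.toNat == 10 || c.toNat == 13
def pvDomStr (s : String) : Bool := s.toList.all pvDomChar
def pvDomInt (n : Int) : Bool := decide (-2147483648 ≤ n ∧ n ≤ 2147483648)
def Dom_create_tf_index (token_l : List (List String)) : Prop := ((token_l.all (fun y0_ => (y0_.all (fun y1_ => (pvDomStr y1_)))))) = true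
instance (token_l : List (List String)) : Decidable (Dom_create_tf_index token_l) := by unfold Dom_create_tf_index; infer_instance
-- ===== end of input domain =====

-- B replaces A's one-phase document-major build (a Counter per document, postings appended
-- as it goes) with a two-phase build around one global nested counter counts[token][doc_id];
-- objective: alternative.

-- ===== PORT A =====
-- for i in range(len(token_l)): doc = token_l[i]; counter = Counter(doc);
-- for token in counter.keys(): index[token].append([i, counter[token]]); return index (a defaultdict → its items).
-- token_l[i] is always in range here, so pyGetD with an unreachable default [] is exact.
def create_tf_index (token_l : List (List String)) : List (String × List (List Int)) :=
  let index : PySem.Dict String (List (List Int)) :=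
    (PySem.List.pyRange 0 (PySem.List.len token_l)).foldl (fun index i =>
      let doc := PySem.List.pyGetD token_l i []
      let counter := PySem.Dict.counter doc
      counter.keys.foldl (fun index token =>
        index.modify token [] (fun l => l ++ [[i, counter.getD token 0]])) index)
      PySem.Dict.empty
  index.items

-- ===== PORT B =====
-- phase 1: counts[token][i] += 1 for each token of each document (a nested Dict);
-- phase 2: for token, per_doc in counts.items(): index[token] = [[doc_id, tf] for … in per_doc.items()].
def create_tf_index_alt (token_l : List (List String)) : List (String × List (List Int)) :=
  let counts : PySem.Dict String (PySem.Dict Int Int) :=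
    (PySem.List.enumerate token_l).foldl (fun counts p =>
      p.2.foldl (fun counts token =>
        counts.modify token PySem.Dict.empty (fun m => m.modify p.1 0 (· + 1))) counts)
      PySem.Dict.empty
  let index : PySem.Dict String (List (List Int)) :=
    counts.items.foldl (fun index p =>
      index.insert p.1 (p.2.items.map (fun q => [q.1, q.2]))) PySem.Dict.empty
  index.items

-- ===== PRECONDITION & SPEC =====
def Spec_create_tf_index (token_l : List (List String)) (out : List (String × List (List Int))) : Prop := out = create_tf_index_alt token_l
instance (token_l : List (List String)) (out : List (String × List (List Int))) : Decidable (Spec_create_tf_index token_l out) := by unfold Spec_create_tf_index; infer_instance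

-- ===== CLAIM (what is proved, stated in full; the proofs are below) =====
def Claim_equal_create_tf_index : Prop := ∀ (token_l : List (List String)), Dom_create_tf_index token_l → Spec_create_tf_index token_l (create_tf_index token_l)

-- ===== LEMMAS AND PROOFS =====

-- the (doc_id, tf) pairs of token t over a run of documents whose first one has index i
def pvPairs (t : String) : Int → List (List String) → List (Int × Int)
  | _, [] => []
  | i, doc :: rest => (if t ∈ doc then [(i, (doc.count t : Int))] else []) ++ pvPairs t (i+1) rest

-- the postings list of token t over a run of documents whose first one has index i
def pvPosts (t : String) : Int → List (List String) → List (List Int)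
  | _, [] => []
  | i, doc :: rest => (if t ∈ doc then [[i, (doc.count t : Int)]] else []) ++ pvPosts t (i+1) rest

lemma pv_posts_eq_pairs (t : String) (docs : List (List String)) : ∀ (a : Int),
    pvPosts t a docs = (pvPairs t a docs).map (fun q => [q.1, q.2]) := by
  induction docs with
  | nil => intro a; simp [pvPosts, pvPairs]
  | cons doc rest ih =>
    intro a
    simp only [pvPosts, pvPairs, List.map_append, ih]
    by_cases h : t ∈ doc <;> simp [h]

lemma pv_pairs_fst_ge (t : String) (docs : List (List String)) : ∀ (a : Int),
    ∀ q ∈ pvPairs t a docs, a ≤ q.1 := by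
  induction docs with
  | nil => intro a q hq; simp [pvPairs] at hq
  | cons doc rest ih =>
    intro a q hq
    simp only [pvPairs, List.mem_append] at hq
    rcases hq with hq | hq
    · by_cases h : t ∈ doc
      · simp [h] at hq
        subst hq
        simp
      · simp [h] at hq
    · have := ih (a+1) q hq; omega

lemma pv_pairs_fst_nodup (t : String) (docs : List (List String)) : ∀ (a : Int),
    ((pvPairs t a docs).map (·.1)).Nodup := by
  induction docs with
  | nil => intro a; simp [pvPairs]
  | cons doc rest ih =>
    intro a
    simp only [pvPairs, List.map_append]
    apply List.Nodup.append
    · by_cases h : t ∈ doc <;> simp [h]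
    · exact ih (a+1)
    · intro x hx hy
      by_cases h : t ∈ doc
      · simp [h] at hx
        simp only [List.mem_map] at hy
        obtain ⟨q, hq, hq1⟩ := hy
        have := pv_pairs_fst_ge t rest (a+1) q hq
        omega
      · simp [h] at hx

lemma pv_update_add (s acc : PySem.Set String) (x : String) :
    PySem.Set.update s (PySem.Set.add acc x) = PySem.Set.add (PySem.Set.update s acc) x := by
  by_cases h : x ∈ acc
  · have h1 : PySem.Set.add acc x = acc := by simp [PySem.Set.add, PySem.Set.contains, h]
    have h2 : x ∈ PySem.Set.update s acc := by rw [PySem.Set.mem_update]; right; exact h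
    rw [h1]
    simp [PySem.Set.add, PySem.Set.contains, h2]
  · have h1 : PySem.Set.add acc x = acc ++ [x] := by simp [PySem.Set.add, PySem.Set.contains, h]
    rw [h1, PySem.Set.update_append]
    simp [PySem.Set.update]

lemma pv_update_foldl_add (l : List String) : ∀ (acc s : PySem.Set String),
    PySem.Set.update s (l.foldl PySem.Set.add acc) = PySem.Set.update (PySem.Set.update s acc) l := by
  induction l with
  | nil => intro acc s; simp [PySem.Set.update_nil]
  | cons x l ih =>
    intro acc s
    simp only [List.foldl_cons]
    rw [ih, pv_update_add]
    rfl

-- updating by set(l) is updating by l itself (duplicate adds are no-ops)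
lemma pv_update_ofList (s : PySem.Set String) (l : List String) :
    PySem.Set.update s (PySem.Set.ofList l) = PySem.Set.update s l := by
  rw [PySem.Set.ofList_eq_foldl, pv_update_foldl_add]
  rfl

lemma pv_update_nil_left (l : List String) :
    PySem.Set.update ([] : PySem.Set String) l = PySem.Set.ofList l := by
  rw [PySem.Set.ofList_eq_foldl]; rfl

lemma pv_filter_beq_nodup (l : List String) (t : String) (h : l.Nodup) :
    l.filter (· == t) = if t ∈ l then [t] else [] := by
  rw [List.filter_beq]
  by_cases hm : t ∈ l
  · simp [List.count_eq_one_of_mem h hm, hm]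
  · simp [List.count_eq_zero_of_not_mem hm, hm]

-- A's per-document inner loop, getD at t: appends t's posting for this document, if any
lemma pv_stepA_getD (d : PySem.Dict String (List (List Int))) (i : Int) (doc : List String) (t : String) :
    ((PySem.Dict.counter doc).keys.foldl (fun d tok =>
        d.modify tok [] (fun l => l ++ [[i, (PySem.Dict.counter doc).getD tok 0]])) d).getD t []
      = d.getD t [] ++ (if t ∈ doc then [[i, (doc.count t : Int)]] else []) := by
  have key : (List.foldl (fun d tok => d.modify tok [] fun l => l ++ [[i, (PySem.Dict.counter doc).getD tok 0]]) d
          (PySem.Dict.counter doc).keys)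
      = (List.foldl (fun d (p : String × List Int) => d.modify p.1 [] fun l => l ++ [p.2]) d
          ((PySem.Dict.counter doc).keys.map (fun tok => (tok, [i, (PySem.Dict.counter doc).getD tok 0])))) := by
    rw [List.foldl_map]
  rw [key, PySem.Dict.getD_foldl_modify_append]
  congr 1
  rw [List.filter_map]
  have hf : ((PySem.Dict.counter doc).keys.filter
      ((fun p : String × List Int => p.1 == t) ∘ (fun tok => (tok, [i, (PySem.Dict.counter doc).getD tok 0]))))
      = (PySem.Dict.counter doc).keys.filter (· == t) := rfl
  rw [hf, pv_filter_beq_nodup _ _ (PySem.Dict.nodup_keys_counter doc)]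
  rw [PySem.Dict.keys_counter]
  by_cases hm : t ∈ doc
  · simp [PySem.Set.mem_ofList, hm, PySem.Dict.getD_counter]
  · simp [PySem.Set.mem_ofList, hm]

-- A's per-document inner loop, keys: updates by the document's tokens
lemma pv_stepA_keys (d : PySem.Dict String (List (List Int))) (i : Int) (doc : List String) :
    ((PySem.Dict.counter doc).keys.foldl (fun d tok =>
        d.modify tok [] (fun l => l ++ [[i, (PySem.Dict.counter doc).getD tok 0]])) d).keys
      = PySem.Set.update d.keys doc := by
  rw [PySem.Dict.keys_foldl_modify _ _ (fun _ tok l => l ++ [[i, (PySem.Dict.counter doc).getD tok 0]])]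
  rw [PySem.Dict.keys_counter, pv_update_ofList]

-- A's outer loop, as a fold over enumerate: keys and getD characterisation
lemma pv_enumA (docs : List (List String)) : ∀ (a : Int) (d : PySem.Dict String (List (List Int))),
    (((PySem.List.enumerate docs a).foldl (fun d p =>
        (PySem.Dict.counter p.2).keys.foldl (fun d tok =>
          d.modify tok [] (fun l => l ++ [[p.1, (PySem.Dict.counter p.2).getD tok 0]])) d) d).keys
      = PySem.Set.update d.keys docs.flatten) ∧
    (∀ t, ((PySem.List.enumerate docs a).foldl (fun d p =>
        (PySem.Dict.counter p.2).keys.foldl (fun d tok =>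
          d.modify tok [] (fun l => l ++ [[p.1, (PySem.Dict.counter p.2).getD tok 0]])) d) d).getD t []
      = d.getD t [] ++ pvPosts t a docs) := by
  induction docs with
  | nil =>
    intro a d
    simp [PySem.List.enumerate, pvPosts, PySem.Set.update_nil]
  | cons doc rest ih =>
    intro a d
    rw [PySem.List.enumerate_cons]
    simp only [List.foldl_cons, List.flatten_cons]
    constructor
    · rw [(ih (a+1) _).1, pv_stepA_keys, PySem.Set.update_append]
    · intro t
      rw [(ih (a+1) _).2 t, pv_stepA_getD]
      simp [pvPosts, List.append_assoc]

-- a fold over range(len(xs)) reading xs[j] is a fold over enumerate(xs)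
lemma pv_range_enum {β : Type} (xs : List (List String)) (f : β → Int → List String → β) :
    ∀ (n a : Nat), xs.length - a = n → ∀ (init : β),
    (PySem.List.pyRange (a : Int) (PySem.List.len xs)).foldl
        (fun d j => f d j (PySem.List.pyGetD xs j [])) init
      = (PySem.List.enumerate (xs.drop a) (a : Int)).foldl (fun d p => f d p.1 p.2) init := by
  intro n
  induction n with
  | zero =>
    intro a ha init
    have hle : xs.length ≤ a := by omega
    rw [List.drop_eq_nil_of_le hle]
    rw [PySem.List.pyRange_one_eq_nil (by simp [PySem.List.len]; exact_mod_cast hle)]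
    simp [PySem.List.enumerate]
  | succ n ih =>
    intro a ha init
    have hlt : a < xs.length := by omega
    rw [PySem.List.pyRange_one_cons (by simp [PySem.List.len]; exact_mod_cast hlt)]
    rw [List.drop_eq_getElem_cons hlt, PySem.List.enumerate_cons]
    simp only [List.foldl_cons]
    rw [PySem.List.pyGetD_eq_getElem xs [] (by positivity) (by exact_mod_cast hlt)]
    have h1 : ((a : Int) + 1) = ((a + 1 : Nat) : Int) := by push_cast; ring
    rw [h1, ih (a + 1) (by omega)]
    simp [Int.toNat_natCast]

-- iterating 'm[i] += 1' n ≥ 1 times on a dict without key i inserts (i, n)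
lemma pv_iter_modify (i : Int) (m : PySem.Dict Int Int) (h : m.contains i = false) :
    ∀ (n : Nat), 1 ≤ n →
    (fun m : PySem.Dict Int Int => m.modify i 0 (· + 1))^[n] m = m.insert i (n : Int) := by
  intro n
  induction n with
  | zero => intro h1; omega
  | succ k ih =>
    intro _
    rcases Nat.eq_zero_or_pos k with hk | hk
    · subst hk
      show m.modify i 0 (· + 1) = m.insert i ((1 : Nat) : Int)
      have : m.modify i 0 (· + 1) = m.insert i (m.getD i 0 + 1) := rfl
      have h0 : m.getD i 0 = 0 := PySem.Dict.getD_of_not_contains m 0 h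
      rw [this, h0]
      norm_num
    · have hcast : ((k + 1 : Nat) : Int) = (k : Int) + 1 := by push_cast; ring
      rw [Function.iterate_succ_apply', ih hk, hcast]
      have : (m.insert i (k : Int)).modify i 0 (· + 1)
          = (m.insert i (k : Int)).insert i ((m.insert i (k : Int)).getD i 0 + 1) := rfl
      rw [this, PySem.Dict.getD_insert_self, PySem.Dict.insert_insert_self]

-- B's inner loop over one document, getD at t: applies 'm[i] += 1' once per occurrence of t
lemma pv_stepB_getD (doc : List String) (i : Int) : ∀ (d : PySem.Dict String (PySem.Dict Int Int)) (t : String),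
    (doc.foldl (fun c tok => c.modify tok PySem.Dict.empty (fun m => m.modify i 0 (· + 1))) d).getD t PySem.Dict.empty
      = (fun m : PySem.Dict Int Int => m.modify i 0 (· + 1))^[doc.count t] (d.getD t PySem.Dict.empty) := by
  induction doc with
  | nil => intro d t; simp
  | cons x doc ih =>
    intro d t
    simp only [List.foldl_cons]
    rw [ih]
    by_cases hx : x = t
    · subst hx
      rw [PySem.Dict.getD_modify_self]
      rw [List.count_cons_self, Function.iterate_succ_apply]
    · rw [PySem.Dict.getD_modify, if_neg (fun he : t = x => hx he.symm)]
      rw [List.count_cons_of_ne hx]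

-- B's counts loop over enumerate, getD at t: inserts t's (doc_id, tf) pairs in document order
lemma pv_countsB_getD (docs : List (List String)) : ∀ (a : Int) (d : PySem.Dict String (PySem.Dict Int Int)) (t : String),
    (∀ j : Int, a ≤ j → (d.getD t PySem.Dict.empty).contains j = false) →
    ((PySem.List.enumerate docs a).foldl (fun c p =>
        p.2.foldl (fun c tok => c.modify tok PySem.Dict.empty (fun m => m.modify p.1 0 (· + 1))) c) d).getD t PySem.Dict.empty
      = (pvPairs t a docs).foldl (fun m q => m.insert q.1 q.2) (d.getD t PySem.Dict.empty) := by
  induction docs with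
  | nil => intro a d t _; simp [PySem.List.enumerate, pvPairs]
  | cons doc rest ih =>
    intro a d t hfresh
    rw [PySem.List.enumerate_cons]
    simp only [List.foldl_cons, pvPairs, List.foldl_append]
    by_cases hm : t ∈ doc
    · have hc : 1 ≤ doc.count t := List.one_le_count_iff.mpr hm
      have hstep : (doc.foldl (fun c tok => c.modify tok PySem.Dict.empty (fun m => m.modify a 0 (· + 1))) d).getD t PySem.Dict.empty
          = (d.getD t PySem.Dict.empty).insert a ((doc.count t : Nat) : Int) := by
        rw [pv_stepB_getD, pv_iter_modify a _ (hfresh a le_rfl) _ hc]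
      rw [ih (a+1) _ t (by
        intro j hj
        rw [hstep, PySem.Dict.contains_insert]
        have h1 : (j == a) = false := by simp; omega
        rw [h1, hfresh j (by omega)]
        rfl)]
      rw [hstep]
      simp [hm]
    · have hc : doc.count t = 0 := List.count_eq_zero_of_not_mem hm
      have hstep : (doc.foldl (fun c tok => c.modify tok PySem.Dict.empty (fun m => m.modify a 0 (· + 1))) d).getD t PySem.Dict.empty
          = d.getD t PySem.Dict.empty := by
        rw [pv_stepB_getD, hc]; rfl
      rw [ih (a+1) _ t (by intro j hj; rw [hstep]; exact hfresh j (by omega))]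
      rw [hstep]
      simp [hm]

-- B's counts loop, keys: updates by all tokens in order
lemma pv_countsB_keys (docs : List (List String)) : ∀ (a : Int) (d : PySem.Dict String (PySem.Dict Int Int)),
    ((PySem.List.enumerate docs a).foldl (fun c p =>
        p.2.foldl (fun c tok => c.modify tok PySem.Dict.empty (fun m => m.modify p.1 0 (· + 1))) c) d).keys
      = PySem.Set.update d.keys docs.flatten := by
  induction docs with
  | nil => intro a d; simp [PySem.List.enumerate, PySem.Set.update_nil]
  | cons doc rest ih =>
    intro a d
    rw [PySem.List.enumerate_cons]
    simp only [List.foldl_cons, List.flatten_cons]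
    rw [ih (a+1)]
    rw [PySem.Dict.keys_foldl_modify doc PySem.Dict.empty (fun _ _ m => m.modify a 0 (· + 1)) d]
    rw [PySem.Set.update_append]

-- the inner counts dict of t, as items: exactly t's (doc_id, tf) pairs
lemma pv_countsB_items (t : String) (docs : List (List String)) :
    ((pvPairs t 0 docs).foldl (fun m q => m.insert q.1 q.2) (PySem.Dict.empty : PySem.Dict Int Int)).items
      = pvPairs t 0 docs := by
  rw [PySem.Dict.items_foldl_insert_fresh (pvPairs t 0 docs)
      (fun q : Int × Int => q.1) (fun q : Int × Int => q.2) PySem.Dict.empty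
      (fun q _ => PySem.Dict.contains_empty q.1) (pv_pairs_fst_nodup t docs 0)]
  have he : (PySem.Dict.empty : PySem.Dict Int Int).items = [] := rfl
  rw [he]
  simp

-- phase 2 of B: inserting fresh distinct keys materialises the map directly
lemma pv_phase2 (K : List String) (C : String → PySem.Dict Int Int) (hK : K.Nodup) :
    ((K.map (fun t => (t, C t))).foldl (fun index p =>
        index.insert p.1 (p.2.items.map (fun q => [q.1, q.2]))) PySem.Dict.empty).items
      = K.map (fun t => (t, (C t).items.map (fun q => [q.1, q.2]))) := by
  rw [PySem.Dict.items_foldl_insert_fresh (K.map (fun t => (t, C t)))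
      (fun p : String × PySem.Dict Int Int => p.1)
      (fun p : String × PySem.Dict Int Int => p.2.items.map (fun q => [q.1, q.2]))
      PySem.Dict.empty (fun p _ => PySem.Dict.contains_empty p.1)
      (by
        rw [List.map_map]
        have h2 : ((fun p : String × PySem.Dict Int Int => p.1) ∘ (fun t => (t, C t)))
            = fun t : String => t := rfl
        rw [h2]
        simpa using hK)]
  have he : (PySem.Dict.empty : PySem.Dict String (List (List Int))).items = [] := rfl
  rw [he, List.nil_append, List.map_map]
  rfl

-- both programs compute set(flatten).map (t ↦ (t, postings of t))
lemma pv_main (token_l : List (List String)) :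
    create_tf_index token_l = create_tf_index_alt token_l := by
  have hnd : (PySem.Set.ofList token_l.flatten).Nodup := PySem.Set.nodup_ofList _
  have hA : create_tf_index token_l
      = (PySem.Set.ofList token_l.flatten).map (fun t => (t, pvPosts t 0 token_l)) := by
    simp only [create_tf_index]
    have hr := pv_range_enum token_l
      (fun d j doc => (PySem.Dict.counter doc).keys.foldl (fun d tok =>
          d.modify tok [] (fun l => l ++ [[j, (PySem.Dict.counter doc).getD tok 0]])) d)
      token_l.length 0 (by omega) PySem.Dict.empty
    simp only [Nat.cast_zero, List.drop_zero] at hr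
    rw [hr]
    have hE := pv_enumA token_l 0 PySem.Dict.empty
    rw [PySem.Dict.items_eq_map_keys _ (by
        rw [hE.1, PySem.Dict.keys_empty]
        exact PySem.Set.nodup_update _ _ List.nodup_nil) []]
    rw [hE.1, PySem.Dict.keys_empty, pv_update_nil_left]
    apply List.map_congr_left
    intro t _
    rw [hE.2 t, PySem.Dict.getD_empty]
    simp
  have hB : create_tf_index_alt token_l
      = (PySem.Set.ofList token_l.flatten).map (fun t => (t, pvPosts t 0 token_l)) := by
    simp only [create_tf_index_alt]
    have hK := pv_countsB_keys token_l 0 PySem.Dict.empty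
    rw [PySem.Dict.keys_empty, pv_update_nil_left] at hK
    have hknd : ((PySem.List.enumerate token_l).foldl (fun c p =>
        p.2.foldl (fun c tok => c.modify tok PySem.Dict.empty (fun m => m.modify p.1 0 (· + 1))) c)
        (PySem.Dict.empty : PySem.Dict String (PySem.Dict Int Int))).keys.Nodup := by
      rw [hK]; exact hnd
    have hitems := PySem.Dict.items_eq_map_keys _ hknd (PySem.Dict.empty : PySem.Dict Int Int)
    rw [hitems, hK, pv_phase2 _ _ hnd]
    apply List.map_congr_left
    intro t ht
    have hg := pv_countsB_getD token_l 0 PySem.Dict.empty t (by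
      intro j hj
      rw [PySem.Dict.getD_empty]
      exact PySem.Dict.contains_empty j)
    rw [PySem.Dict.getD_empty] at hg
    rw [hg, pv_countsB_items, pv_posts_eq_pairs]
  rw [hA, hB]

-- ===== VERDICT (by name: the statement is the Claim_ definition above) =====
theorem create_tf_index_spec : Claim_equal_create_tf_index := by
  intro token_l _
  unfold Spec_create_tf_index
  exact pv_main token_l
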